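-- pv_equiv track=rewrite | github.com/manas-17045/LeetcodeSolutions | Leetcode 1801-1900/1856/1856-2.py | maxSumMinProduct
-- ===== SOURCE A (Python) =====
-- def maxSumMinProduct(nums: list[int]) -> int:
--     """
--     Calculates the maximum score of a subarray, where the score is defined as the minimum value in the subarray
--     multiplied by the sum of all elements in the subarray.
--
--     :param nums: A list of integers.
--     :return: The maximum score modulo 10^9 + 7.
--     """
--     MOD = 10 ** 9 + 7
--     n = len(nums)
--     # prefix sums: prefix[i] = sum of nums[:i]
--     prefix = [0] * (n + 1)
--     for i in range(n):
--         prefix[i + 1] = prefix[i] + nums[i]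
--
--     # previous index with value < nums[i]
--     prev_less = [-1] * n
--     stack = []
--     for i in range(n):
--         # pop indices whose value >= current so top becomes previous < current
--         while stack and nums[stack[-1]] >= nums[i]:
--             stack.pop()
--         prev_less[i] = stack[-1] if stack else -1
--         stack.append(i)
--
--     # next index with value < nums[i]
--     next_less = [n] * n
--     stack.clear()
--     for i in range(n - 1, -1, -1):
--         # pop indices whose value > current so top becomes next < current
--         while stack and nums[stack[-1]] > nums[i]:
--             stack.pop()
--         next_less[i] = stack[-1] if stack else n
--         stack.append(i)
--
--     max_prod = 0
--     for i in range(n):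
--         left = prev_less[i] + 1
--         right = next_less[i] - 1
--         total = prefix[right + 1] - prefix[left]
--         prod = nums[i] * total
--         if prod > max_prod:
--             max_prod = prod
--
--     return max_prod % MOD
-- ===== SOURCE B (Python) =====
-- def maxSumMinProduct(nums: list[int]) -> int:
--     """
--     Maximum over subarrays of (min of subarray) * (sum of subarray), modulo 10**9 + 7.
--     Single left-to-right pass with one monotonic stack fused with the scoring,
--     instead of A's separate prev_less / next_less passes plus a final scan.
--     """
--     MOD = 10 ** 9 + 7
--     n = len(nums)
--     prefix = [0] * (n + 1)
--     for i in range(n):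
--         prefix[i + 1] = prefix[i] + nums[i]
--
--     max_prod = 0
--     stack = []
--     for i in range(n + 1):
--         while stack and (i == n or nums[stack[-1]] >= nums[i]):
--             j = stack.pop()
--             left = stack[-1] + 1 if stack else 0
--             total = prefix[i] - prefix[left]
--             max_prod = max(max_prod, nums[j] * total)
--         if i < n:
--             stack.append(i)
--     return max_prod % MOD
-- ===== Notes on version B (the rewrite author's own statement) =====
-- stated objective: simpler
-- what changed: A's three index passes (prev_less stack pass, next_less stack pass, final scoring scan) are fused into one left-to-right pass with a single monotonic stack and a sentinel step i==n: each index is scored with its window's sum at the moment it is popped, so the prev_less/next_less arrays disappear.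
import Mathlib
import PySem

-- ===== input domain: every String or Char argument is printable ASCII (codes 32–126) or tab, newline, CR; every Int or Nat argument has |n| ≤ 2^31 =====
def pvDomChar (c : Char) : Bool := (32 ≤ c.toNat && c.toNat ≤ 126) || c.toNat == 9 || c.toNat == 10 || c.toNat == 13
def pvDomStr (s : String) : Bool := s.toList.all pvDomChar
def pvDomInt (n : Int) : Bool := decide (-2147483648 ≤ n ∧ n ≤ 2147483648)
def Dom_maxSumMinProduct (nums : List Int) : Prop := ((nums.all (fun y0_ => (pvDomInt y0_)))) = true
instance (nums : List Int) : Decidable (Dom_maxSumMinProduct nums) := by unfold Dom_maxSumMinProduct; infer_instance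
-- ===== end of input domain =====

-- B fuses A's three index passes (prev_less stack, next_less stack, final scan) into ONE
-- left-to-right pass with a single monotonic stack and a sentinel step i = n (objective: simpler).

-- ===== PORT A =====
-- A's first while-loop: pop stack indices whose value is >= the current value (top at head)
def popGE (nums : List Int) (x : Int) : List Nat → List Nat
  | [] => []
  | j :: rest => if x ≤ nums.getD j 0 then popGE nums x rest else j :: rest

-- A's second while-loop: pop stack indices whose value is > the current value
def popGT (nums : List Int) (x : Int) : List Nat → List Nat
  | [] => []
  | j :: rest => if x < nums.getD j 0 then popGT nums x rest else j :: rest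

def maxSumMinProduct (nums : List Int) : Int :=
  let M : Int := 10 ^ 9 + 7
  let n := nums.length
  -- prefix sums: prefix[i] = sum of nums[:i]
  let pre := (List.range n).foldl (fun p i => p ++ [p.getD i 0 + nums.getD i 0]) [0]
  -- previous index with value < nums[i]
  let pl := (List.range n).foldl
      (fun (st : List Int × List Nat) i =>
        let s := popGE nums (nums.getD i 0) st.2
        (st.1 ++ [match s with | [] => (-1 : Int) | j :: _ => (j : Int)], i :: s))
      ([], [])
  let prevLess := pl.1
  -- next index with value < nums[i] (iterating i = n-1 .. 0; prepending keeps index order)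
  let nl := ((List.range n).reverse).foldl
      (fun (st : List Int × List Nat) i =>
        let s := popGT nums (nums.getD i 0) st.2
        ((match s with | [] => (n : Int) | j :: _ => (j : Int)) :: st.1, i :: s))
      ([], [])
  let nextLess := nl.1
  let maxp := (List.range n).foldl
      (fun m i =>
        let left := prevLess.getD i (-1) + 1
        let right := nextLess.getD i 0 - 1
        let total := PySem.List.pyGetD pre (right + 1) 0 - PySem.List.pyGetD pre left 0
        let prod := nums.getD i 0 * total
        if prod > m then prod else m) 0
  PySem.Int.mod maxp M

-- ===== PORT B =====
-- B's inner while-loop: pop each index j with (i = n or nums[j] >= nums[i]) and score it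
def popScore (nums pre : List Int) (n i : Nat) : List Nat → Int → List Nat × Int
  | [], m => ([], m)
  | j :: rest, m =>
    if i = n ∨ nums.getD i 0 ≤ nums.getD j 0 then
      let left : Int := match rest with | [] => 0 | t :: _ => (t : Int) + 1
      let total := PySem.List.pyGetD pre (i : Int) 0 - PySem.List.pyGetD pre left 0
      popScore nums pre n i rest (max m (nums.getD j 0 * total))
    else (j :: rest, m)

def maxSumMinProduct_alt (nums : List Int) : Int :=
  let M : Int := 10 ^ 9 + 7
  let n := nums.length
  let pre := (List.range n).foldl (fun p i => p ++ [p.getD i 0 + nums.getD i 0]) [0]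
  let st := (List.range (n + 1)).foldl
      (fun (st : List Nat × Int) i =>
        let r := popScore nums pre n i st.1 st.2
        (if i < n then i :: r.1 else r.1, r.2))
      ([], 0)
  PySem.Int.mod st.2 M

-- ===== PRECONDITION & SPEC =====
def Spec_maxSumMinProduct (nums : List Int) (out : Int) : Prop := out = maxSumMinProduct_alt nums
instance (nums : List Int) (out : Int) : Decidable (Spec_maxSumMinProduct nums out) := by unfold Spec_maxSumMinProduct; infer_instance

-- ===== CLAIM (what is proved, stated in full; the proofs are below) =====
def Claim_equal_maxSumMinProduct : Prop := ∀ (nums : List Int), Dom_maxSumMinProduct nums → Spec_maxSumMinProduct nums (maxSumMinProduct nums)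

-- ===== LEMMAS AND PROOFS =====

-- abbreviations for the proofs: element value and prefix sum
def vA (nums : List Int) (j : Nat) : Int := nums.getD j 0
def sS (nums : List Int) (i : Nat) : Int := (nums.take i).sum

-- "j survives in the left-to-right monotonic stack at time i"
def goodLb (nums : List Int) (i j : Nat) : Bool :=
  decide (j < i) && (List.range' (j + 1) (i - (j + 1))).all (fun k => decide (vA nums j < vA nums k))

-- "k survives in the right-to-left monotonic stack when indices [i, n) have been processed"
def goodRb (nums : List Int) (i k : Nat) : Bool :=
  (List.range' i (k - i)).all (fun m => decide (vA nums k ≤ vA nums m))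

-- the two stacks, characterised as filters of index ranges (top of stack at the head)
def stkL (nums : List Int) (i : Nat) : List Nat :=
  ((List.range i).filter (goodLb nums i)).reverse
def stkR (nums : List Int) (i : Nat) : List Nat :=
  (List.range' i (nums.length - i)).filter (goodRb nums i)

-- previous index with value < nums[i] (as A's sentinel-coded Int), and next index with value <= nums[i]
def plI (nums : List Int) (i : Nat) : Int :=
  match ((List.range i).filter (fun j => decide (vA nums j < vA nums i))).getLast? with
  | none => -1 | some j => (j : Int)
def nlI (nums : List Int) (i : Nat) : Int :=
  match ((List.range' (i + 1) (nums.length - (i + 1))).filter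
      (fun k => decide (vA nums k ≤ vA nums i))).head? with
  | none => (nums.length : Int) | some k => (k : Int)

-- the score A's final loop assigns to index i
def candS (nums : List Int) (i : Nat) : Int :=
  vA nums i * (sS nums (nlI nums i).toNat - sS nums (plI nums i + 1).toNat)

-- B's pop condition at step i
def cB (nums : List Int) (i j : Nat) : Bool := decide (i = nums.length ∨ vA nums i ≤ vA nums j)

-- the running maximum of the scores of the indices already popped (nlI < i) in B
def MXlt (nums : List Int) (i : Nat) : Int :=
  (((List.range nums.length).filter (fun j => decide (nlI nums j < (i : Int))))).foldl
    (fun m j => max m (candS nums j)) 0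

theorem goodLb_iff (nums : List Int) (i j : Nat) :
    goodLb nums i j = true ↔ (j < i ∧ ∀ k, j < k → k < i → vA nums j < vA nums k) := by
  simp only [goodLb, Bool.and_eq_true, decide_eq_true_eq, List.all_eq_true, List.mem_range'_1]
  constructor
  · rintro ⟨h1, h2⟩
    exact ⟨h1, fun k hk1 hk2 => h2 k ⟨by omega, by omega⟩⟩
  · rintro ⟨h1, h2⟩
    exact ⟨h1, fun k hk => h2 k (by omega) (by omega)⟩

theorem goodRb_iff (nums : List Int) (i k : Nat) (h : i ≤ k) :
    goodRb nums i k = true ↔ (∀ m, i ≤ m → m < k → vA nums k ≤ vA nums m) := by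
  simp only [goodRb, List.all_eq_true, List.mem_range'_1, decide_eq_true_eq]
  constructor
  · intro h2 m hm1 hm2
    exact h2 m ⟨by omega, by omega⟩
  · intro h2 m hm
    exact h2 m (by omega) (by omega)

theorem mem_stkL (nums : List Int) (i j : Nat) :
    j ∈ stkL nums i ↔ (j < i ∧ ∀ k, j < k → k < i → vA nums j < vA nums k) := by
  simp only [stkL, List.mem_reverse, List.mem_filter, List.mem_range]
  constructor
  · rintro ⟨h1, h2⟩
    exact ((goodLb_iff nums i j).mp h2).imp id id
  · rintro ⟨h1, h2⟩
    exact ⟨h1, (goodLb_iff nums i j).mpr ⟨h1, h2⟩⟩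

theorem mem_stkR (nums : List Int) (i k : Nat) :
    k ∈ stkR nums i ↔ (i ≤ k ∧ k < nums.length ∧ ∀ m, i ≤ m → m < k → vA nums k ≤ vA nums m) := by
  simp only [stkR, List.mem_filter, List.mem_range'_1]
  constructor
  · rintro ⟨⟨h1, h2⟩, h3⟩
    exact ⟨h1, by omega, (goodRb_iff nums i k h1).mp h3⟩
  · rintro ⟨h1, h2, h3⟩
    exact ⟨⟨h1, by omega⟩, (goodRb_iff nums i k h1).mpr h3⟩

theorem stkL_sorted (nums : List Int) (i : Nat) : (stkL nums i).Pairwise (· > ·) := by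
  unfold stkL
  rw [List.pairwise_reverse]
  exact List.Pairwise.filter _ List.pairwise_lt_range

theorem stkL_strong (nums : List Int) (i : Nat) :
    (stkL nums i).Pairwise (fun a b => b < a ∧ vA nums b < vA nums a) := by
  rw [List.pairwise_iff_forall_sublist]
  intro a b hs
  have hba : b < a := List.pairwise_iff_forall_sublist.mp (stkL_sorted nums i) hs
  have hbm : b ∈ stkL nums i := hs.subset (by simp)
  have ham : a ∈ stkL nums i := hs.subset (by simp)
  rcases (mem_stkL nums i b).mp hbm with ⟨hbi, hb⟩
  rcases (mem_stkL nums i a).mp ham with ⟨hai, _⟩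
  exact ⟨hba, hb a hba hai⟩

theorem stkL_nodup (nums : List Int) (i : Nat) : (stkL nums i).Nodup := by
  unfold stkL
  exact List.nodup_reverse.mpr (List.Nodup.filter _ List.nodup_range)

theorem stkR_strong (nums : List Int) (i : Nat) :
    (stkR nums i).Pairwise (fun a b => a < b ∧ vA nums b ≤ vA nums a) := by
  rw [List.pairwise_iff_forall_sublist]
  intro a b hs
  have hab : a < b := by
    have : (stkR nums i).Pairwise (· < ·) := List.Pairwise.filter _ (List.pairwise_lt_range' 1)
    exact List.pairwise_iff_forall_sublist.mp this hs
  have hbm : b ∈ stkR nums i := hs.subset (by simp)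
  have ham : a ∈ stkR nums i := hs.subset (by simp)
  rcases (mem_stkR nums i b).mp hbm with ⟨hbi, hbn, hb⟩
  rcases (mem_stkR nums i a).mp ham with ⟨hai, _, _⟩
  exact ⟨hab, hb a hai hab⟩

-- generic: head? of a filtered sorted list picks the least / greatest satisfying element
theorem head?_filter_none {l : List Nat} {p : Nat → Bool} :
    (l.filter p).head? = none ↔ ∀ m ∈ l, ¬ p m = true := by
  simp

theorem head?_filter_lt {l : List Nat} {p : Nat → Bool} (hl : l.Pairwise (· < ·)) (k : Nat) :
    (l.filter p).head? = some k ↔ (k ∈ l ∧ p k = true ∧ ∀ m ∈ l, m < k → ¬ p m = true) := by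
  induction l with
  | nil => simp
  | cons a t ih =>
    rcases List.pairwise_cons.mp hl with ⟨ha, ht⟩
    by_cases hc : p a
    · simp only [List.filter_cons, hc, if_true, List.head?_cons, Option.some_inj]
      constructor
      · rintro rfl
        exact ⟨List.mem_cons_self, hc, by
          intro m hm hma
          rcases List.mem_cons.mp hm with rfl | hm
          · omega
          · exact absurd (ha m hm) (by omega)⟩
      · rintro ⟨hk, hpk, hmax⟩
        rcases List.mem_cons.mp hk with rfl | hk
        · rfl
        · exact absurd hc (hmax a List.mem_cons_self (ha k hk))
    · simp only [List.filter_cons, hc, Bool.false_eq_true, if_false, ih ht]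
      constructor
      · rintro ⟨hk, hpk, hmax⟩
        refine ⟨List.mem_cons_of_mem _ hk, hpk, ?_⟩
        intro m hm hma
        rcases List.mem_cons.mp hm with rfl | hm
        · exact hc
        · exact hmax m hm hma
      · rintro ⟨hk, hpk, hmax⟩
        rcases List.mem_cons.mp hk with rfl | hk
        · exact absurd hpk hc
        · exact ⟨hk, hpk, fun m hm hma => hmax m (List.mem_cons_of_mem _ hm) hma⟩


theorem head?_filter_gt {l : List Nat} {p : Nat → Bool} (hl : l.Pairwise (· > ·)) (k : Nat) :
    (l.filter p).head? = some k ↔ (k ∈ l ∧ p k = true ∧ ∀ m ∈ l, k < m → ¬ p m = true) := by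
  induction l with
  | nil => simp
  | cons a t ih =>
    rcases List.pairwise_cons.mp hl with ⟨ha, ht⟩
    by_cases hc : p a
    · simp only [List.filter_cons, hc, if_true, List.head?_cons, Option.some_inj]
      constructor
      · rintro rfl
        exact ⟨List.mem_cons_self, hc, by
          intro m hm hma
          rcases List.mem_cons.mp hm with rfl | hm
          · omega
          · exact absurd (ha m hm) (by omega)⟩
      · rintro ⟨hk, hpk, hmax⟩
        rcases List.mem_cons.mp hk with rfl | hk
        · rfl
        · exact absurd hc (hmax a List.mem_cons_self (ha k hk))
    · simp only [List.filter_cons, hc, Bool.false_eq_true, if_false, ih ht]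
      constructor
      · rintro ⟨hk, hpk, hmax⟩
        refine ⟨List.mem_cons_of_mem _ hk, hpk, ?_⟩
        intro m hm hma
        rcases List.mem_cons.mp hm with rfl | hm
        · exact hc
        · exact hmax m hm hma
      · rintro ⟨hk, hpk, hmax⟩
        rcases List.mem_cons.mp hk with rfl | hk
        · exact absurd hpk hc
        · exact ⟨hk, hpk, fun m hm hma => hmax m (List.mem_cons_of_mem _ hm) hma⟩


-- generic: under a pairwise implication, a while-pop is a filter
theorem takeWhile_eq_filter {α : Type} {c : α → Bool} {l : List α}
    (h : l.Pairwise (fun a b => c b = true → c a = true)) : l.takeWhile c = l.filter c := by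
  induction l with
  | nil => rfl
  | cons a t ih =>
    rcases List.pairwise_cons.mp h with ⟨ha, ht⟩
    by_cases hc : c a
    · simp [hc, ih ht]
    · have h2 : List.filter c t = [] := by
        rw [List.filter_eq_nil_iff]
        intro b hb hcb
        exact hc (ha b hb hcb)
      simp [hc, h2]


theorem dropWhile_eq_filter {α : Type} {c : α → Bool} {l : List α}
    (h : l.Pairwise (fun a b => c b = true → c a = true)) :
    l.dropWhile c = l.filter (fun x => ! c x) := by
  induction l with
  | nil => rfl
  | cons a t ih =>
    rcases List.pairwise_cons.mp h with ⟨ha, ht⟩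
    by_cases hc : c a
    · simp [hc, ih ht]
    · have h2 : ∀ b ∈ t, (!c b) = true := by
        intro b hb
        by_contra hcb
        simp at hcb
        exact hc (ha b hb hcb)
      simp [hc, List.filter_eq_self.mpr h2]


theorem popGE_eq_dropWhile (nums : List Int) (x : Int) (s : List Nat) :
    popGE nums x s = s.dropWhile (fun j => decide (x ≤ nums.getD j 0)) := by
  induction s with
  | nil => rfl
  | cons j rest ih =>
    simp only [popGE, List.dropWhile_cons]
    by_cases h : x ≤ nums.getD j 0
    · rw [if_pos h, if_pos (by simpa using h), ih]
    · rw [if_neg h, if_neg (by simpa using h)]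

theorem popGT_eq_dropWhile (nums : List Int) (x : Int) (s : List Nat) :
    popGT nums x s = s.dropWhile (fun j => decide (x < nums.getD j 0)) := by
  induction s with
  | nil => rfl
  | cons j rest ih =>
    simp only [popGT, List.dropWhile_cons]
    by_cases h : x < nums.getD j 0
    · rw [if_pos h, if_pos (by simpa using h), ih]
    · rw [if_neg h, if_neg (by simpa using h)]

theorem popGE_stkL (nums : List Int) (i : Nat) :
    popGE nums (nums.getD i 0) (stkL nums i)
      = (stkL nums i).filter (fun j => decide (vA nums j < vA nums i)) := by
  rw [popGE_eq_dropWhile]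
  have hp : (stkL nums i).Pairwise (fun a b =>
      (decide (nums.getD i 0 ≤ nums.getD b 0)) = true →
      (decide (nums.getD i 0 ≤ nums.getD a 0)) = true) := by
    refine (stkL_strong nums i).imp ?_
    intro a b hab hcb
    simp only [decide_eq_true_eq] at hcb ⊢
    have := hab.2
    simp only [vA] at this
    exact le_trans hcb (le_of_lt this)
  rw [dropWhile_eq_filter hp]
  apply List.filter_congr
  intro x _
  show (!decide (nums.getD i 0 ≤ nums.getD x 0)) = decide (vA nums x < vA nums i)
  rw [← decide_not]
  exact decide_eq_decide.mpr not_le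

theorem popGT_stkR (nums : List Int) (i : Nat) :
    popGT nums (nums.getD i 0) (stkR nums (i + 1))
      = (stkR nums (i + 1)).filter (fun k => decide (vA nums k ≤ vA nums i)) := by
  rw [popGT_eq_dropWhile]
  have hp : (stkR nums (i + 1)).Pairwise (fun a b =>
      (decide (nums.getD i 0 < nums.getD b 0)) = true →
      (decide (nums.getD i 0 < nums.getD a 0)) = true) := by
    refine (stkR_strong nums (i + 1)).imp ?_
    intro a b hab hcb
    simp only [decide_eq_true_eq] at hcb ⊢
    have := hab.2
    simp only [vA] at this
    exact lt_of_lt_of_le hcb this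
  rw [dropWhile_eq_filter hp]
  apply List.filter_congr
  intro x _
  show (!decide (nums.getD i 0 < nums.getD x 0)) = decide (vA nums x ≤ vA nums i)
  rw [← decide_not]
  exact decide_eq_decide.mpr not_lt

theorem stkL_step (nums : List Int) (i : Nat) :
    stkL nums (i + 1) = i :: (stkL nums i).filter (fun j => decide (vA nums j < vA nums i)) := by
  unfold stkL
  rw [List.range_succ, List.filter_append]
  have hi : goodLb nums (i + 1) i = true := (goodLb_iff nums (i + 1) i).mpr ⟨by omega, by omega⟩
  simp only [List.filter_cons, hi, List.filter_nil, if_true]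
  rw [List.reverse_append]
  simp only [List.reverse_cons, List.reverse_nil, List.nil_append, List.singleton_append]
  rw [List.filter_reverse, List.filter_filter]
  refine congrArg (i :: ·) (congrArg List.reverse ?_)
  apply List.filter_congr
  intro j hj
  rw [List.mem_range] at hj
  rw [Bool.eq_iff_iff]
  simp only [Bool.and_eq_true, decide_eq_true_eq, goodLb_iff]
  constructor
  · rintro ⟨_, h2⟩
    exact ⟨h2 i (by omega) (by omega), hj, fun k hk1 hk2 => h2 k hk1 (by omega)⟩
  · rintro ⟨hv, _, h2⟩
    refine ⟨by omega, fun k hk1 hk2 => ?_⟩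
    by_cases hk : k = i
    · exact hk ▸ hv
    · exact h2 k hk1 (by omega)

theorem stkR_step (nums : List Int) (i : Nat) (h : i < nums.length) :
    stkR nums i = i :: (stkR nums (i + 1)).filter (fun k => decide (vA nums k ≤ vA nums i)) := by
  unfold stkR
  have hn : nums.length - i = (nums.length - (i + 1)) + 1 := by omega
  rw [hn, List.range'_succ]
  have hi : goodRb nums i i = true := by simp [goodRb]
  simp only [List.filter_cons, hi, if_true]
  congr 1
  rw [List.filter_filter]
  apply List.filter_congr
  intro k hk
  rw [List.mem_range'_1] at hk
  rw [Bool.eq_iff_iff]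
  simp only [Bool.and_eq_true, decide_eq_true_eq]
  rw [goodRb_iff nums i k (by omega), goodRb_iff nums (i + 1) k (by omega)]
  constructor
  · intro h2
    exact ⟨h2 i le_rfl (by omega), fun m hm1 hm2 => h2 m (by omega) hm2⟩
  · rintro ⟨hv, h2⟩ m hm1 hm2
    by_cases hm : m = i
    · exact hm ▸ hv
    · exact h2 m (by omega) hm2

-- match-on-list to match-on-head?
theorem matchHead (l : List Nat) (d : Int) :
    (match l with | [] => d | j :: _ => (j : Int))
      = (match l.head? with | none => d | some j => (j : Int)) := by
  cases l <;> rfl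

-- getLast? of a filtered range picks the greatest satisfying index
theorem getLast?_filter_range_some (p : Nat → Bool) (i k : Nat) :
    ((List.range i).filter p).getLast? = some k
      ↔ (k < i ∧ p k = true ∧ ∀ m, k < m → m < i → ¬ p m = true) := by
  rw [← List.head?_reverse, ← List.filter_reverse]
  rw [head?_filter_gt (List.pairwise_reverse.mpr (by simpa using List.pairwise_lt_range)) k]
  simp only [List.mem_reverse, List.mem_range]
  constructor
  · rintro ⟨h1, h2, h3⟩
    exact ⟨h1, h2, fun m hm1 hm2 => h3 m hm2 hm1⟩
  · rintro ⟨h1, h2, h3⟩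
    exact ⟨h1, h2, fun m hm1 hm2 => h3 m hm2 hm1⟩

theorem getLast?_filter_range_none (p : Nat → Bool) (i : Nat) :
    ((List.range i).filter p).getLast? = none ↔ ∀ m, m < i → ¬ p m = true := by
  rw [List.getLast?_eq_none_iff, List.filter_eq_nil_iff]
  simp [List.mem_range]

theorem sS_succ (nums : List Int) (m : Nat) (h : m < nums.length) :
    sS nums (m + 1) = sS nums m + nums.getD m 0 := by
  unfold sS
  rw [List.take_add_one, List.sum_append, List.getElem?_eq_getElem h]
  simp [List.getD_eq_getElem?_getD, List.getElem?_eq_getElem h]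

-- the entry A's prev_less pass records at step i is plI
theorem plI_head (nums : List Int) (i : Nat) :
    (match popGE nums (nums.getD i 0) (stkL nums i) with
      | [] => (-1 : Int) | j :: _ => (j : Int)) = plI nums i := by
  rw [popGE_stkL, matchHead]
  have hrev : ((stkL nums i).filter (fun j => decide (vA nums j < vA nums i))).head?
      = (((List.range i).filter (fun j =>
          decide (vA nums j < vA nums i) && goodLb nums i j)).reverse).head? := by
    unfold stkL
    rw [← List.filter_reverse, List.filter_filter, List.filter_reverse]
  rw [hrev, List.head?_reverse]
  unfold plI
  have hq : ((List.range i).filter (fun j =>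
      decide (vA nums j < vA nums i) && goodLb nums i j)).getLast?
      = ((List.range i).filter (fun j => decide (vA nums j < vA nums i))).getLast? := by
    cases h2 : ((List.range i).filter (fun j => decide (vA nums j < vA nums i))).getLast? with
    | none =>
      rw [getLast?_filter_range_none] at h2 ⊢
      intro m hm
      simp only [Bool.and_eq_true, not_and]
      intro hv _
      exact absurd hv (h2 m hm)
    | some j =>
      rcases (getLast?_filter_range_some _ i j).mp h2 with ⟨h1, hv, hmax⟩
      rw [getLast?_filter_range_some]
      simp only [decide_eq_true_eq] at hv
      refine ⟨h1, ?_, ?_⟩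
      · simp only [Bool.and_eq_true, decide_eq_true_eq]
        refine ⟨hv, (goodLb_iff nums i j).mpr ⟨h1, fun k hk1 hk2 => ?_⟩⟩
        have := hmax k hk1 hk2
        simp only [decide_eq_true_eq] at this
        omega
      · intro m hm1 hm2
        simp only [Bool.and_eq_true, not_and]
        intro hv2 _
        exact absurd hv2 (hmax m hm1 hm2)
  rw [hq]

-- the entry A's next_less pass records at step i is nlI
theorem nlI_head (nums : List Int) (i : Nat) (_h : i < nums.length) :
    (match popGT nums (nums.getD i 0) (stkR nums (i + 1)) with
      | [] => ((nums.length : Nat) : Int) | k :: _ => (k : Int)) = nlI nums i := by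
  rw [popGT_stkR, matchHead]
  have hrw : (stkR nums (i + 1)).filter (fun k => decide (vA nums k ≤ vA nums i))
      = (List.range' (i + 1) (nums.length - (i + 1))).filter
          (fun k => decide (vA nums k ≤ vA nums i) && goodRb nums (i + 1) k) := by
    unfold stkR
    rw [List.filter_filter]
  rw [hrw]
  unfold nlI
  have hq : ((List.range' (i + 1) (nums.length - (i + 1))).filter (fun k =>
      decide (vA nums k ≤ vA nums i) && goodRb nums (i + 1) k)).head?
      = ((List.range' (i + 1) (nums.length - (i + 1))).filter
          (fun k => decide (vA nums k ≤ vA nums i))).head? := by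
    cases h2 : ((List.range' (i + 1) (nums.length - (i + 1))).filter
        (fun k => decide (vA nums k ≤ vA nums i))).head? with
    | none =>
      rw [head?_filter_none] at h2 ⊢
      intro m hm
      simp only [Bool.and_eq_true, not_and]
      intro hv _
      exact absurd hv (h2 m hm)
    | some k =>
      rcases (head?_filter_lt (List.pairwise_lt_range' 1) k).mp h2 with ⟨hk, hv, hmin⟩
      rw [head?_filter_lt (List.pairwise_lt_range' 1) k]
      simp only [decide_eq_true_eq] at hv
      rw [List.mem_range'_1] at hk
      refine ⟨List.mem_range'_1.mpr hk, ?_, ?_⟩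
      · simp only [Bool.and_eq_true, decide_eq_true_eq]
        refine ⟨hv, (goodRb_iff nums (i + 1) k (by omega)).mpr fun m hm1 hm2 => ?_⟩
        have := hmin m (List.mem_range'_1.mpr ⟨hm1, by omega⟩) hm2
        simp only [decide_eq_true_eq] at this
        omega
      · intro m hm1 hm2
        simp only [Bool.and_eq_true, not_and]
        intro hv2 _
        exact absurd hv2 (hmin m hm1 hm2)
  rw [hq]

theorem plI_lb (nums : List Int) (i : Nat) : -1 ≤ plI nums i := by
  unfold plI
  cases h : ((List.range i).filter (fun j => decide (vA nums j < vA nums i))).getLast? with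
  | none => dsimp only; omega
  | some j =>
    dsimp only
    have := Int.natCast_nonneg j
    omega

theorem plI_lt (nums : List Int) (i : Nat) : plI nums i < i := by
  unfold plI
  cases h : ((List.range i).filter (fun j => decide (vA nums j < vA nums i))).getLast? with
  | none => dsimp only; omega
  | some j =>
    rcases (getLast?_filter_range_some _ i j).mp h with ⟨h1, _, _⟩
    dsimp only
    omega

theorem nlI_gt (nums : List Int) (i : Nat) (h : i < nums.length) : (i : Int) < nlI nums i := by
  unfold nlI
  cases hh : ((List.range' (i + 1) (nums.length - (i + 1))).filter
      (fun k => decide (vA nums k ≤ vA nums i))).head? with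
  | none => dsimp only; omega
  | some k =>
    have hk : k ∈ List.range' (i + 1) (nums.length - (i + 1)) :=
      List.mem_filter.mp (List.mem_of_mem_head? hh) |>.1
    rw [List.mem_range'_1] at hk
    dsimp only
    omega

theorem nlI_le (nums : List Int) (i : Nat) : nlI nums i ≤ nums.length := by
  unfold nlI
  cases hh : ((List.range' (i + 1) (nums.length - (i + 1))).filter
      (fun k => decide (vA nums k ≤ vA nums i))).head? with
  | none => dsimp only; omega
  | some k =>
    have hk : k ∈ List.range' (i + 1) (nums.length - (i + 1)) :=
      List.mem_filter.mp (List.mem_of_mem_head? hh) |>.1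
    rw [List.mem_range'_1] at hk
    dsimp only
    omega

-- the prefix-sum loop produces the prefix sums
theorem pre_eq (nums : List Int) : ∀ m, m ≤ nums.length →
    (List.range m).foldl (fun p i => p ++ [p.getD i 0 + nums.getD i 0]) [0]
      = (List.range (m + 1)).map (sS nums) := by
  intro m
  induction m with
  | zero => intro _; rfl
  | succ m ih =>
    intro h
    rw [List.range_succ, List.foldl_concat, ih (by omega)]
    rw [PySem.List.getD_map_range (sS nums) (m + 1) m 0 (by omega)]
    rw [show List.range (m + 1 + 1) = List.range (m + 1) ++ [m + 1] from List.range_succ]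
    rw [List.map_append]
    congr 1
    simp only [List.map_cons, List.map_nil]
    rw [← sS_succ nums m (by omega)]

theorem preGet (nums : List Int) (a : Int) (h0 : 0 ≤ a) (hn : a ≤ nums.length) :
    PySem.List.pyGetD ((List.range (nums.length + 1)).map (sS nums)) a 0 = sS nums a.toNat := by
  have h1 : a = ((a.toNat : Nat) : Int) := (Int.toNat_of_nonneg h0).symm
  rw [h1, PySem.List.pyGetD_natCast]
  exact PySem.List.getD_map_range (sS nums) (nums.length + 1) a.toNat 0 (by omega)

-- A's prev_less loop
theorem prevLoop (nums : List Int) : ∀ m,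
    (List.range m).foldl (fun (st : List Int × List Nat) i =>
      let s := popGE nums (nums.getD i 0) st.2
      (st.1 ++ [match s with | [] => (-1 : Int) | j :: _ => (j : Int)], i :: s)) ([], [])
    = ((List.range m).map (plI nums), stkL nums m) := by
  intro m
  induction m with
  | zero => rfl
  | succ m ih =>
    rw [List.range_succ, List.foldl_concat, ih]
    dsimp only
    rw [List.map_append]
    rw [stkL_step, ← popGE_stkL]
    exact congrArg (fun z => (List.map (plI nums) (List.range m) ++ [z],
      m :: popGE nums (nums.getD m 0) (stkL nums m))) (plI_head nums m)

-- A's next_less loop (processing indices n-1 .. n-t)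
theorem nextLoop (nums : List Int) : ∀ t, t ≤ nums.length →
    ((List.range' (nums.length - t) t).reverse).foldl (fun (st : List Int × List Nat) i =>
      let s := popGT nums (nums.getD i 0) st.2
      ((match s with | [] => ((nums.length : Nat) : Int) | j :: _ => (j : Int)) :: st.1, i :: s)) ([], [])
    = ((List.range' (nums.length - t) t).map (nlI nums), stkR nums (nums.length - t)) := by
  intro t
  induction t with
  | zero =>
    intro _
    simp only [List.range'_zero, List.reverse_nil, List.foldl_nil, List.map_nil]
    unfold stkR
    rw [Nat.sub_zero, Nat.sub_self]
    simp [List.range'_zero]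
  | succ t ih =>
    intro h
    have hi : nums.length - (t + 1) < nums.length := by omega
    have hsplit : List.range' (nums.length - (t + 1)) (t + 1)
        = (nums.length - (t + 1)) :: List.range' (nums.length - t) t := by
      have h2 : nums.length - (t + 1) + 1 = nums.length - t := by omega
      rw [List.range'_succ, h2]
    rw [hsplit]
    simp only [List.reverse_cons, List.foldl_concat, ih (by omega)]
    set i := nums.length - (t + 1) with hidef
    have hit : i + 1 = nums.length - t := by omega
    rw [← hit]
    rw [stkR_step nums i hi, ← popGT_stkR]
    rw [List.map_cons]
    exact congrArg (fun z => (z :: List.map (nlI nums) (List.range' (i + 1) t),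
      i :: popGT nums (nums.getD i 0) (stkR nums (i + 1)))) (nlI_head nums i hi)

-- key: an index j on the stack is popped exactly at step nlI j
theorem E1 (nums : List Int) (i j : Nat) (hin : i ≤ nums.length) (hj : j ∈ stkL nums i)
    (hc : i = nums.length ∨ vA nums i ≤ vA nums j) : nlI nums j = (i : Int) := by
  rcases (mem_stkL nums i j).mp hj with ⟨hji, hgood⟩
  unfold nlI
  by_cases hn : i = nums.length
  · have hnone : ((List.range' (j + 1) (nums.length - (j + 1))).filter
        (fun k => decide (vA nums k ≤ vA nums j))).head? = none := by
      rw [head?_filter_none]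
      intro m hm
      rw [List.mem_range'_1] at hm
      simp only [decide_eq_true_eq, not_le]
      exact hgood m (by omega) (by omega)
    rw [hnone]
    dsimp only
    omega
  · have hvi : vA nums i ≤ vA nums j := hc.resolve_left hn
    have hsome : ((List.range' (j + 1) (nums.length - (j + 1))).filter
        (fun k => decide (vA nums k ≤ vA nums j))).head? = some i := by
      rw [head?_filter_lt (List.pairwise_lt_range' 1) i]
      refine ⟨List.mem_range'_1.mpr ⟨by omega, by omega⟩, by simpa using hvi, ?_⟩
      intro m hm hmi
      rw [List.mem_range'_1] at hm
      simp only [decide_eq_true_eq, not_le]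
      exact hgood m (by omega) (by omega)
    rw [hsome]

theorem E1' (nums : List Int) (i j : Nat) (hin : i ≤ nums.length) (hjn : j < nums.length)
    (hnl : nlI nums j = (i : Int)) : j ∈ stkL nums i ∧ (i = nums.length ∨ vA nums i ≤ vA nums j) := by
  unfold nlI at hnl
  cases hh : ((List.range' (j + 1) (nums.length - (j + 1))).filter
      (fun k => decide (vA nums k ≤ vA nums j))).head? with
  | none =>
    rw [hh] at hnl
    dsimp only at hnl
    have hi : i = nums.length := by omega
    rw [head?_filter_none] at hh
    subst hi
    refine ⟨(mem_stkL nums nums.length j).mpr ⟨hjn, fun k hk1 hk2 => ?_⟩, Or.inl rfl⟩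
    have := hh k (List.mem_range'_1.mpr ⟨by omega, by omega⟩)
    simp only [decide_eq_true_eq, not_le] at this
    exact this
  | some k =>
    rw [hh] at hnl
    dsimp only at hnl
    have hk : k = i := by omega
    subst hk
    rcases (head?_filter_lt (List.pairwise_lt_range' 1) k).mp hh with ⟨hmem, hv, hmin⟩
    rw [List.mem_range'_1] at hmem
    simp only [decide_eq_true_eq] at hv
    refine ⟨(mem_stkL nums k j).mpr ⟨by omega, fun m hm1 hm2 => ?_⟩, Or.inr hv⟩
    have := hmin m (List.mem_range'_1.mpr ⟨by omega, by omega⟩) hm2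
    simp only [decide_eq_true_eq, not_le] at this
    exact this

-- key: the stack entry directly below j is prev_less[j]
theorem E2 (nums : List Int) (i j : Nat) (rest : List Nat) (h : (j :: rest) <:+ stkL nums i) :
    plI nums j = (match rest with | [] => (-1 : Int) | t :: _ => (t : Int)) := by
  rcases h with ⟨pre, hpre⟩
  have hj : j ∈ stkL nums i := by rw [← hpre]; simp
  rcases (mem_stkL nums i j).mp hj with ⟨hji, hgood⟩
  have hpair := stkL_strong nums i
  rw [← hpre, List.pairwise_append] at hpair
  rcases hpair with ⟨hpre2, hsuf, hcross⟩
  -- any t0 < j that is the greatest index with value < nums[j] lies on the stack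
  have hcore : ∀ t0, t0 < j → vA nums t0 < vA nums j →
      (∀ m, t0 < m → m < j → ¬ vA nums m < vA nums j) → t0 ∈ stkL nums i := by
    intro t0 h1 h2 hmax
    refine (mem_stkL nums i t0).mpr ⟨by omega, fun k hk1 hk2 => ?_⟩
    rcases lt_trichotomy k j with hkj | hkj | hkj
    · have := hmax k hk1 hkj
      have hvj : vA nums j ≤ vA nums k := by omega
      omega
    · subst hkj; exact h2
    · exact lt_trans h2 (hgood k hkj hk2)
  cases rest with
  | nil =>
    unfold plI
    cases hg : ((List.range j).filter (fun t => decide (vA nums t < vA nums j))).getLast? with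
    | none => rfl
    | some t0 =>
      exfalso
      rcases (getLast?_filter_range_some _ j t0).mp hg with ⟨h1, h2, hmax⟩
      simp only [decide_eq_true_eq] at h2
      have ht0 : t0 ∈ stkL nums i := hcore t0 h1 h2 (fun m hm1 hm2 => by
        have := hmax m hm1 hm2
        simp only [decide_eq_true_eq] at this
        exact this)
      rw [← hpre] at ht0
      rcases List.mem_append.mp ht0 with hp | hp
      · exact absurd (hcross t0 hp j (by simp)).1 (by omega)
      · have := List.mem_singleton.mp hp
        omega
  | cons t rest' =>
    have hrel : t < j ∧ vA nums t < vA nums j := by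
      have := List.pairwise_cons.mp hsuf
      exact this.1 t (by simp)
    unfold plI
    have hsome : ((List.range j).filter (fun m => decide (vA nums m < vA nums j))).getLast?
        = some t := by
      have hne : ((List.range j).filter (fun m => decide (vA nums m < vA nums j))) ≠ [] := by
        intro hnil
        have : t ∈ (List.range j).filter (fun m => decide (vA nums m < vA nums j)) := by
          rw [List.mem_filter, List.mem_range]
          exact ⟨hrel.1, by simpa using hrel.2⟩
        rw [hnil] at this
        exact absurd this (List.not_mem_nil)
      rcases Option.ne_none_iff_exists'.mp
        (mt List.getLast?_eq_none_iff.mp hne) with ⟨t0, hg⟩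
      rcases (getLast?_filter_range_some _ j t0).mp hg with ⟨h1, h2, hmax⟩
      simp only [decide_eq_true_eq] at h2
      have htle : t ≤ t0 := by
        by_contra hgt
        have := hmax t (by omega) hrel.1
        simp only [decide_eq_true_eq] at this
        exact this hrel.2
      rcases eq_or_lt_of_le htle with rfl | hlt
      · exact hg
      · exfalso
        have ht0 : t0 ∈ stkL nums i := hcore t0 h1 h2 (fun m hm1 hm2 => by
          have := hmax m hm1 hm2
          simp only [decide_eq_true_eq] at this
          exact this)
        rw [← hpre] at ht0
        rcases List.mem_append.mp ht0 with hp | hp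
        · exact absurd (hcross t0 hp j (by simp)).1 (by omega)
        · rcases List.mem_cons.mp hp with rfl | hp
          · omega
          · rcases List.mem_cons.mp hp with rfl | hp
            · omega
            · have := (List.pairwise_cons.mp (List.pairwise_cons.mp hsuf).2).1 t0 hp
              omega
    rw [hsome]

-- B's inner while-loop pops-and-scores a prefix of the stack
theorem popSpec (nums : List Int) (i : Nat) (hin : i ≤ nums.length) :
    ∀ s m, s <:+ stkL nums i →
    popScore nums ((List.range (nums.length + 1)).map (sS nums)) nums.length i s m
      = (s.dropWhile (cB nums i),
         (s.takeWhile (cB nums i)).foldl (fun m j => max m (candS nums j)) m) := by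
  intro s
  induction s with
  | nil => intro m _; rfl
  | cons j rest ih =>
    intro m hs
    have hrest : rest <:+ stkL nums i := (List.suffix_cons j rest).trans hs
    have hj : j ∈ stkL nums i := hs.subset (by simp)
    have hji : j < i := ((mem_stkL nums i j).mp hj).1
    by_cases hc : i = nums.length ∨ nums.getD i 0 ≤ nums.getD j 0
    · have hcb : cB nums i j = true := decide_eq_true hc
      have hnl : nlI nums j = (i : Int) := E1 nums i j hin hj hc
      have hpl := E2 nums i j rest hs
      have hlt : (plI nums j : Int) < (j : Int) := plI_lt nums j
      have hlb : -1 ≤ plI nums j := plI_lb nums j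
      simp only [popScore]
      rw [if_pos hc]
      cases rest with
      | nil =>
        dsimp only at hpl ⊢
        rw [List.takeWhile_cons, List.dropWhile_cons, if_pos hcb, if_pos hcb, List.foldl_cons]
        rw [preGet nums (0 : Int) (by omega) (by omega)]
        rw [preGet nums (i : Int) (by omega) (by omega)]
        have hcand : nums.getD j 0 * (sS nums ((i : Int)).toNat - sS nums ((0 : Int)).toNat)
            = candS nums j := by
          unfold candS vA
          rw [hnl]
          have ht : ((0 : Int)).toNat = (plI nums j + 1).toNat := by omega
          rw [ht]
        rw [hcand]
        exact ih (max m (candS nums j)) hrest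
      | cons t r =>
        dsimp only at hpl ⊢
        rw [List.takeWhile_cons, List.dropWhile_cons, if_pos hcb, if_pos hcb, List.foldl_cons]
        have harg : ((t : Int) + 1) = plI nums j + 1 := by omega
        rw [harg]
        rw [preGet nums (plI nums j + 1) (by omega) (by omega)]
        rw [preGet nums (i : Int) (by omega) (by omega)]
        have hcand : nums.getD j 0 * (sS nums ((i : Int)).toNat - sS nums ((plI nums j + 1)).toNat)
            = candS nums j := by
          unfold candS vA
          rw [hnl]
        rw [hcand]
        exact ih (max m (candS nums j)) hrest
    · have hcb : cB nums i j = false := decide_eq_false hc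
      simp only [popScore]
      rw [if_neg hc]
      rw [List.takeWhile_cons, List.dropWhile_cons, hcb]
      simp only [Bool.false_eq_true, if_false]
      rw [List.foldl_nil]

-- the indices popped at step i are exactly those with nlI = i
theorem popped_perm (nums : List Int) (i : Nat) (h : i ≤ nums.length) :
    ((stkL nums i).filter (cB nums i)).Perm
      ((List.range nums.length).filter (fun j => decide (nlI nums j = (i : Int)))) := by
  rw [List.perm_ext_iff_of_nodup
    (List.Nodup.filter _ (stkL_nodup nums i))
    (List.Nodup.filter _ List.nodup_range)]
  intro x
  rw [List.mem_filter, List.mem_filter, List.mem_range]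
  constructor
  · rintro ⟨hx, hcb⟩
    have hc := of_decide_eq_true hcb
    have hxn : x < nums.length := by
      have := ((mem_stkL nums i x).mp hx).1
      omega
    exact ⟨hxn, decide_eq_true (E1 nums i x h hx hc)⟩
  · rintro ⟨hxn, hnl⟩
    have := E1' nums i x h hxn (of_decide_eq_true hnl)
    exact ⟨this.1, decide_eq_true this.2⟩

theorem MX_step (nums : List Int) (i : Nat) (h : i < nums.length) :
    ((stkL nums i).filter (cB nums i)).foldl (fun m j => max m (candS nums j)) (MXlt nums i)
      = MXlt nums (i + 1) := by
  have hrc : RightCommutative (fun (m : Int) (j : Nat) => max m (candS nums j)) :=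
    ⟨fun b a1 a2 => max_right_comm b (candS nums a1) (candS nums a2)⟩
  have hsplit : ((List.range nums.length).filter
        (fun j => decide (nlI nums j < ((i + 1 : Nat) : Int)))).Perm
      (((List.range nums.length).filter (fun j => decide (nlI nums j < (i : Int)))) ++
        ((stkL nums i).filter (cB nums i))) := by
    have hdisj : ((List.range nums.length).filter
        (fun j => decide (nlI nums j < (i : Int)))).Disjoint
        ((stkL nums i).filter (cB nums i)) := by
      intro x hx1 hx2
      rw [List.mem_filter] at hx1
      have h1 := of_decide_eq_true hx1.2
      have hx2' := (popped_perm nums i (by omega)).subset hx2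
      rw [List.mem_filter] at hx2'
      have h2 := of_decide_eq_true hx2'.2
      omega
    rw [List.perm_ext_iff_of_nodup (List.Nodup.filter _ List.nodup_range)
      (List.Nodup.append (List.Nodup.filter _ List.nodup_range)
        (List.Nodup.filter _ (stkL_nodup nums i)) hdisj)]
    intro x
    simp only [List.mem_append, List.mem_filter, List.mem_range]
    constructor
    · rintro ⟨hxn, hlt⟩
      have hlt' := of_decide_eq_true hlt
      push_cast at hlt'
      by_cases hi : nlI nums x < (i : Int)
      · exact Or.inl ⟨hxn, decide_eq_true hi⟩
      · right
        have hni : nlI nums x = (i : Int) := by omega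
        have := E1' nums i x (by omega) hxn hni
        exact ⟨this.1, decide_eq_true this.2⟩
    · rintro (⟨hxn, hlt⟩ | ⟨hx1, hx2⟩)
      · have := of_decide_eq_true hlt
        refine ⟨hxn, decide_eq_true ?_⟩
        push_cast
        omega
      · have hxi : x < i := ((mem_stkL nums i x).mp hx1).1
        have hnl := E1 nums i x (by omega) hx1 (of_decide_eq_true hx2)
        refine ⟨by omega, decide_eq_true ?_⟩
        push_cast
        omega
  unfold MXlt
  rw [List.Perm.foldl_eq (f := fun (m : Int) (j : Nat) => max m (candS nums j))
    (rcomm := hrc) hsplit 0]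
  rw [List.foldl_append]

-- B's outer loop invariant
theorem BInv (nums : List Int) : ∀ i, i ≤ nums.length →
    (List.range i).foldl (fun (st : List Nat × Int) i =>
      let r := popScore nums ((List.range (nums.length + 1)).map (sS nums)) nums.length i st.1 st.2
      (if i < nums.length then i :: r.1 else r.1, r.2)) ([], 0)
    = (stkL nums i, MXlt nums i) := by
  intro i
  induction i with
  | zero =>
    intro _
    have h0 : MXlt nums 0 = 0 := by
      unfold MXlt
      have hnil : (List.range nums.length).filter
          (fun j => decide (nlI nums j < ((0 : Nat) : Int))) = [] := by
        rw [List.filter_eq_nil_iff]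
        intro j hj
        rw [List.mem_range] at hj
        simp only [decide_eq_true_eq, not_lt]
        have := nlI_gt nums j hj
        omega
      rw [hnil]
      rfl
    simp only [List.range_zero, List.foldl_nil]
    rw [h0]
    rfl
  | succ i ih =>
    intro h
    have hlt : i < nums.length := by omega
    rw [show List.range (i + 1) = List.range i ++ [i] from List.range_succ,
      List.foldl_concat, ih (by omega)]
    dsimp only
    rw [popSpec nums i (by omega) (stkL nums i) (MXlt nums i) (List.suffix_refl _)]
    have hp : (stkL nums i).Pairwise (fun a b => cB nums i b = true → cB nums i a = true) := by
      refine (stkL_strong nums i).imp ?_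
      intro a b hab hcb
      rcases of_decide_eq_true hcb with hn | hv
      · exact decide_eq_true (Or.inl hn)
      · exact decide_eq_true (Or.inr (le_trans hv (le_of_lt hab.2)))
    have hdw : (stkL nums i).dropWhile (cB nums i)
        = (stkL nums i).filter (fun j => decide (vA nums j < vA nums i)) := by
      rw [dropWhile_eq_filter hp]
      apply List.filter_congr
      intro x _
      unfold cB
      rw [← decide_not]
      apply decide_eq_decide.mpr
      rw [not_or, not_le]
      constructor
      · rintro ⟨_, h2⟩
        exact h2
      · intro h2
        exact ⟨by omega, h2⟩
    have htw : (stkL nums i).takeWhile (cB nums i) = (stkL nums i).filter (cB nums i) :=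
      takeWhile_eq_filter hp
    rw [hdw, htw, if_pos hlt, ← stkL_step, MX_step nums i hlt]

theorem Bfinal (nums : List Int) :
    ((List.range (nums.length + 1)).foldl (fun (st : List Nat × Int) i =>
      let r := popScore nums ((List.range (nums.length + 1)).map (sS nums)) nums.length i st.1 st.2
      (if i < nums.length then i :: r.1 else r.1, r.2)) ([], 0)).2
    = (List.range nums.length).foldl (fun m j => max m (candS nums j)) 0 := by
  set P := (List.range (nums.length + 1)).map (sS nums) with hP
  rw [show List.range (nums.length + 1) = List.range nums.length ++ [nums.length]
    from List.range_succ, List.foldl_concat]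
  rw [hP]
  rw [BInv nums nums.length le_rfl]
  dsimp only
  rw [popSpec nums nums.length le_rfl (stkL nums nums.length) (MXlt nums nums.length)
    (List.suffix_refl _)]
  have hall : ∀ j ∈ stkL nums nums.length, cB nums nums.length j = true :=
    fun j _ => decide_eq_true (Or.inl rfl)
  have hp : (stkL nums nums.length).Pairwise
      (fun a b => cB nums nums.length b = true → cB nums nums.length a = true) := by
    refine (stkL_strong nums nums.length).imp ?_
    intro a b _ _
    exact decide_eq_true (Or.inl rfl)
  rw [takeWhile_eq_filter hp, List.filter_eq_self.mpr hall]
  dsimp only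
  have hrc : RightCommutative (fun (m : Int) (j : Nat) => max m (candS nums j)) :=
    ⟨fun b a1 a2 => max_right_comm b (candS nums a1) (candS nums a2)⟩
  have hperm : (List.range nums.length).Perm
      (((List.range nums.length).filter
          (fun j => decide (nlI nums j < ((nums.length : Nat) : Int)))) ++ stkL nums nums.length) := by
    have hdisj : ((List.range nums.length).filter
        (fun j => decide (nlI nums j < ((nums.length : Nat) : Int)))).Disjoint
        (stkL nums nums.length) := by
      intro x hx1 hx2
      rw [List.mem_filter] at hx1
      have h1 := of_decide_eq_true hx1.2
      have h2 := E1 nums nums.length x le_rfl hx2 (Or.inl rfl)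
      omega
    rw [List.perm_ext_iff_of_nodup List.nodup_range
      (List.Nodup.append (List.Nodup.filter _ List.nodup_range)
        (stkL_nodup nums nums.length) hdisj)]
    intro x
    simp only [List.mem_append, List.mem_filter, List.mem_range]
    constructor
    · intro hxn
      by_cases hi : nlI nums x < (nums.length : Int)
      · exact Or.inl ⟨hxn, decide_eq_true hi⟩
      · right
        have hle := nlI_le nums x
        have hni : nlI nums x = (nums.length : Int) := by omega
        exact (E1' nums nums.length x le_rfl hxn hni).1
    · rintro (⟨hxn, _⟩ | hx)
      · exact hxn
      · exact ((mem_stkL nums nums.length x).mp hx).1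
  rw [List.Perm.foldl_eq (f := fun (m : Int) (j : Nat) => max m (candS nums j))
    (rcomm := hrc) hperm 0]
  rw [List.foldl_append]
  rfl

-- ===== VERDICT (by name: the statement is the Claim_ definition above) =====
theorem maxSumMinProduct_spec : Claim_equal_maxSumMinProduct := by
  unfold Claim_equal_maxSumMinProduct
  intro nums _
  unfold Spec_maxSumMinProduct maxSumMinProduct maxSumMinProduct_alt
  dsimp only
  rw [pre_eq nums nums.length le_rfl]
  rw [prevLoop nums nums.length]
  have hnext := nextLoop nums nums.length le_rfl
  rw [Nat.sub_self, ← List.range_eq_range'] at hnext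
  rw [hnext]
  dsimp only
  rw [Bfinal nums]
  rw [PySem.List.foldl_congr_mem (List.range nums.length) _
    (fun m i => max m (candS nums i)) 0 ?_]
  · intro m x hx
    rw [List.mem_range] at hx
    dsimp only
    rw [PySem.List.getD_map_range (plI nums) nums.length x (-1) hx,
        PySem.List.getD_map_range (nlI nums) nums.length x 0 hx]
    have h1 : nlI nums x - 1 + 1 = nlI nums x := by ring
    rw [h1]
    have hgt := nlI_gt nums x hx
    have hle := nlI_le nums x
    have hlb := plI_lb nums x
    have hlt := plI_lt nums x
    rw [preGet nums (nlI nums x) (by omega) hle]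
    rw [preGet nums (plI nums x + 1) (by omega) (by omega)]
    show (if nums.getD x 0 * (sS nums (nlI nums x).toNat - sS nums (plI nums x + 1).toNat) > m
        then nums.getD x 0 * (sS nums (nlI nums x).toNat - sS nums (plI nums x + 1).toNat)
        else m) = max m (candS nums x)
    unfold candS vA
    split_ifs with hgt2
    · exact (max_eq_right (le_of_lt hgt2)).symm
    · exact (max_eq_left (le_of_not_gt hgt2)).symm
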